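-- pv_equiv track=rewrite | github.com/hhoppe/advent_of_code | 2015/advent_of_code_2015.py | day3_part2
-- ===== SOURCE A (Python) =====
-- def day3_part2(s):
--   dyx_from_ch = {'>': (0, 1), '<': (0, -1), 'v': (1, 0), '^': (-1, 0)}
--   yxs = [(0, 0)] * 2
--   houses = {yxs[0]}
--
--   for index, ch in enumerate(s.strip()):
--     dy, dx = dyx_from_ch[ch]
--     actor = index % 2
--     y, x = yxs[actor]
--     y, x = y + dy, x + dx
--     houses.add((y, x))
--     yxs[actor] = y, x
--
--   return len(houses)
-- ===== SOURCE B (Python) =====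
-- def day3_part2(s):
--   dyx_from_ch = {'>': (0, 1), '<': (0, -1), 'v': (1, 0), '^': (-1, 0)}
--   t = s.strip()
--
--   def walk(moves):
--     y, x = 0, 0
--     seen = {(0, 0)}
--     for ch in moves:
--       dy, dx = dyx_from_ch[ch]
--       y, x = y + dy, x + dx
--       seen.add((y, x))
--     return seen
--
--   return len(walk(t[0::2]) | walk(t[1::2]))
-- ===== Notes on version B (the rewrite author's own statement) =====
-- stated objective: alternative
-- what changed: Replaces the single index%2-interleaved pass over a 2-slot position list by splitting the moves into the two parity subsequences (t[0::2], t[1::2]), walking each with its own independent single-position loop and seed set, and returning the size of the union of the two visited sets.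
-- outside the precondition, e.g. on day3_part2('><a'): A raises KeyError, B raises KeyError
import Mathlib
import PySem

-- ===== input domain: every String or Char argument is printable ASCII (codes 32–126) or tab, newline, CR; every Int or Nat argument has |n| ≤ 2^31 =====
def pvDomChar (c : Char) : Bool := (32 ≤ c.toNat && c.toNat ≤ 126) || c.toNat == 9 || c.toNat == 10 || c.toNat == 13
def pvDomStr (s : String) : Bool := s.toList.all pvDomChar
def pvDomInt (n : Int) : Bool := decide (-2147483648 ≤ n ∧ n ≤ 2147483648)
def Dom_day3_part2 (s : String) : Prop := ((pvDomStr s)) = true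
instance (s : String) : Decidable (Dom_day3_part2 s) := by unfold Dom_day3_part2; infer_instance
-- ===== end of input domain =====

-- B replaces A's single index%2-interleaved pass by two independent walks over the
-- parity slices t[0::2] and t[1::2], whose visited sets are unioned ('alternative').

-- ===== PORT A =====
-- dyx_from_ch (both Pythons define this same literal dict)
def pvDyx : PySem.Dict Char (Int × Int) :=
  ⟨[('>', ((0:Int), (1:Int))), ('<', (0, -1)), ('v', (1, 0)), ('^', (-1, 0))]⟩

-- dyx_from_ch[ch]; a missing key is KeyError in Python (excluded by Pre_), the default is never used there
def pvMove (c : Char) : Int × Int := PySem.Dict.getD pvDyx c (0, 0)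

-- one iteration of A's loop body: state = (yxs[0], yxs[1], houses), input = (index, ch)
def pvStepA (st : (Int × Int) × (Int × Int) × PySem.Set (Int × Int)) (ic : Int × Char) :
    (Int × Int) × (Int × Int) × PySem.Set (Int × Int) :=
  let d := pvMove ic.2
  if PySem.Int.mod ic.1 2 = 0 then
    let p := (st.1.1 + d.1, st.1.2 + d.2)
    (p, st.2.1, PySem.Set.add st.2.2 p)
  else
    let p := (st.2.1.1 + d.1, st.2.1.2 + d.2)
    (st.1, p, PySem.Set.add st.2.2 p)

def day3_part2 (s : String) : Int :=
  let stripped := PySem.Chars.strip s.toList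
  let res := (PySem.List.enumerate stripped 0).foldl pvStepA
      ((0, 0), (0, 0), PySem.Set.ofList [(((0:Int)), ((0:Int)))])
  PySem.Set.len res.2.2

-- ===== PORT B =====
-- one iteration of B's walk body: state = ((y, x), seen)
def pvStepB (st : (Int × Int) × PySem.Set (Int × Int)) (c : Char) :
    (Int × Int) × PySem.Set (Int × Int) :=
  let d := pvMove c
  let p := (st.1.1 + d.1, st.1.2 + d.2)
  (p, PySem.Set.add st.2 p)

def pvWalk (moves : List Char) : PySem.Set (Int × Int) :=
  (moves.foldl pvStepB ((0, 0), PySem.Set.ofList [(((0:Int)), ((0:Int)))])).2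

def day3_part2_alt (s : String) : Int :=
  let t := PySem.Chars.strip s.toList
  let a := pvWalk ((PySem.List.slice? t (some 0) none 2).getD [])
  let b := pvWalk ((PySem.List.slice? t (some 1) none 2).getD [])
  PySem.Set.len (PySem.Set.union a b)

-- ===== PRECONDITION & SPEC =====
-- Pre_ excludes exactly the inputs whose stripped string contains a character other than
-- '>', '<', 'v', '^': there Python A (and B alike) raises KeyError.
def Pre_day3_part2 (s : String) : Prop :=
  ((PySem.Chars.strip s.toList).all
    (fun c => c == '>' || c == '<' || c == 'v' || c == '^')) = true
instance (s : String) : Decidable (Pre_day3_part2 s) := by unfold Pre_day3_part2; infer_instance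

def pvWitness_day3_part2 : String := "  ^v<>v "

def Spec_day3_part2 (s : String) (out : Int) : Prop := out = day3_part2_alt s
instance (s : String) (out : Int) : Decidable (Spec_day3_part2 s out) := by
  unfold Spec_day3_part2; infer_instance

-- ===== CLAIM (what is proved, stated in full; the proofs are below) =====
def Claim_equal_day3_part2 : Prop :=
  ∀ (s : String), Dom_day3_part2 s → Pre_day3_part2 s → Spec_day3_part2 s (day3_part2 s)

-- ===== LEMMAS AND PROOFS =====

-- the elements of a list at even positions (what t[0::2] yields; t[1::2] is pvEvens t.tail)
def pvEvens {α : Type} : List α → List α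
  | [] => []
  | [x] => [x]
  | x :: _ :: xs => x :: pvEvens xs

-- the successive positions visited when walking ms from p (excluding p itself), in order
def pvVis (p : Int × Int) : List Char → List (Int × Int)
  | [] => []
  | c :: cs => (p.1 + (pvMove c).1, p.2 + (pvMove c).2) ::
      pvVis (p.1 + (pvMove c).1, p.2 + (pvMove c).2) cs

-- the positions visited by A's two alternating actors starting at p0 (to move) and p1, in order
def pvIVis (p0 p1 : Int × Int) : List Char → List (Int × Int)
  | [] => []
  | c :: cs => (p0.1 + (pvMove c).1, p0.2 + (pvMove c).2) ::
      pvIVis p1 (p0.1 + (pvMove c).1, p0.2 + (pvMove c).2) cs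

lemma pvEvens_cons {α : Type} (c : α) (cs : List α) :
    pvEvens (c :: cs) = c :: pvEvens cs.tail := by
  cases cs <;> rfl

lemma filterMap_range_evens {α : Type} (ys : List α) :
    (List.range ((ys.length + 1) / 2)).filterMap (fun k => ys[2 * k]?) = pvEvens ys := by
  fun_induction pvEvens ys with
  | case1 => simp
  | case2 x => simp [List.range_succ]
  | case3 x y ys ih =>
    have hlen : (((x :: y :: ys).length) + 1) / 2 = (ys.length + 1) / 2 + 1 := by
      simp; omega
    rw [hlen, List.range_succ_eq_map]
    simp only [List.filterMap_cons, List.filterMap_map]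
    have h2 : ((fun k => (x :: y :: ys)[2 * k]?) ∘ (fun k => k + 1)) =
        (fun k : Nat => ys[2 * k]?) := by
      funext k
      show (x :: y :: ys)[2 * (k + 1)]? = _
      have he : 2 * (k + 1) = (2 * k) + 2 := by omega
      rw [he]; rfl
    rw [h2, ih]; rfl

lemma slice2_gen {α : Type} (xs : List α) (n : Nat) :
    PySem.List.slice? xs (some (n : Int)) none 2 = some (pvEvens (xs.drop n)) := by
  simp only [PySem.List.slice?, PySem.List.sliceIndices]
  norm_num
  have hnn : ¬((n : Int) < 0) := Int.not_lt.mpr (Int.natCast_nonneg n)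
  rw [if_neg hnn]
  have hmin : min (n : Int) (xs.length : Int) = ((min n xs.length : Nat) : Int) := by
    simp [Nat.cast_min]
  rw [hmin]
  have hcount : (if (((min n xs.length : Nat) : Int)) < (xs.length : Int) then
        (((xs.length : Int) - ((min n xs.length : Nat) : Int) + 2 - 1) / 2).toNat else 0)
      = ((xs.drop n).length + 1) / 2 := by
    rw [List.length_drop]
    split_ifs with h
    · omega
    · omega
  rw [hcount, ← filterMap_range_evens]
  apply List.filterMap_congr
  intro k _
  by_cases hn : n ≤ xs.length
  · rw [min_eq_left hn]
    have ht : (((n : Nat) : Int) + 2 * (k : Int)).toNat = n + 2 * k := by omega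
    rw [ht]
    rw [List.getElem?_drop]
  · rw [min_eq_right (by omega : xs.length ≤ n)]
    have hd : xs.drop n = [] := List.drop_eq_nil_of_le (by omega)
    rw [hd]
    have ht : (((xs.length : Nat) : Int) + 2 * (k : Int)).toNat = xs.length + 2 * k := by omega
    rw [ht]
    simp

-- B's walk computes its seed updated with the visited positions, in order
lemma foldB_eq (ms : List Char) : ∀ (p : Int × Int) (S : PySem.Set (Int × Int)),
    (ms.foldl pvStepB (p, S)).2 = PySem.Set.update S (pvVis p ms) := by
  induction ms with
  | nil => intro p S; simp [pvVis, PySem.Set.update_nil]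
  | cons c ms ih =>
    intro p S
    rw [List.foldl_cons]
    show (ms.foldl pvStepB ((p.1 + (pvMove c).1, p.2 + (pvMove c).2),
        PySem.Set.add S (p.1 + (pvMove c).1, p.2 + (pvMove c).2))).2 = _
    rw [ih, pvVis, PySem.Set.update_cons]

-- A's fold computes its seed updated with the interleaved visited positions;
-- the parity of the enumeration start decides which actor moves first
lemma foldA_eq (cs : List Char) : ∀ (k : Int) (p0 p1 : Int × Int) (S : PySem.Set (Int × Int)),
    ((PySem.List.enumerate cs k).foldl pvStepA (p0, p1, S)).2.2 =
      if PySem.Int.mod k 2 = 0 then PySem.Set.update S (pvIVis p0 p1 cs)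
      else PySem.Set.update S (pvIVis p1 p0 cs) := by
  induction cs with
  | nil =>
    intro k p0 p1 S
    simp [PySem.List.enumerate, pvIVis, PySem.Set.update_nil]
  | cons c cs ih =>
    intro k p0 p1 S
    rw [PySem.List.enumerate_cons, List.foldl_cons]
    have hmod : PySem.Int.mod k 2 = k % 2 := PySem.Int.mod_eq_emod_of_pos (by omega)
    have hmod1 : PySem.Int.mod (k + 1) 2 = (k + 1) % 2 :=
      PySem.Int.mod_eq_emod_of_pos (by omega)
    by_cases h : PySem.Int.mod k 2 = 0
    · rw [if_pos h]
      simp only [pvStepA]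
      rw [if_pos h]
      rw [ih (k + 1)]
      rw [if_neg (by omega : ¬ PySem.Int.mod (k + 1) 2 = 0)]
      rw [pvIVis, PySem.Set.update_cons]
    · rw [if_neg h]
      simp only [pvStepA]
      rw [if_neg h]
      rw [ih (k + 1)]
      rw [if_pos (by omega : PySem.Int.mod (k + 1) 2 = 0)]
      rw [pvIVis, PySem.Set.update_cons]

-- the interleaved visited positions are, as a set, the two per-actor visited position sets
lemma mem_ivis (cs : List Char) : ∀ (p0 p1 : Int × Int) (q : Int × Int),
    q ∈ pvIVis p0 p1 cs ↔ q ∈ pvVis p0 (pvEvens cs) ∨ q ∈ pvVis p1 (pvEvens cs.tail) := by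
  induction cs with
  | nil => intro p0 p1 q; simp [pvIVis, pvEvens, pvVis]
  | cons c cs ih =>
    intro p0 p1 q
    rw [pvIVis, pvEvens_cons]
    show q ∈ _ :: pvIVis p1 _ cs ↔ _
    rw [List.mem_cons, ih]
    rw [List.tail_cons, pvVis]
    rw [List.mem_cons]
    tauto

set_option maxHeartbeats 1000000 in
theorem day3_part2_spec_aux (s : String) : day3_part2 s = day3_part2_alt s := by
  simp only [day3_part2, day3_part2_alt]
  rw [foldA_eq _ 0]
  rw [if_pos (by decide : PySem.Int.mod 0 2 = 0)]
  have h0 : PySem.List.slice? (PySem.Chars.strip s.toList) (some 0) none 2 =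
      some (pvEvens (PySem.Chars.strip s.toList)) := by
    have := slice2_gen (PySem.Chars.strip s.toList) 0
    simpa using this
  have h1 : PySem.List.slice? (PySem.Chars.strip s.toList) (some 1) none 2 =
      some (pvEvens (PySem.Chars.strip s.toList).tail) := by
    have := slice2_gen (PySem.Chars.strip s.toList) 1
    simpa [List.drop_one] using this
  rw [h0, h1]
  simp only [Option.getD_some]
  unfold pvWalk
  rw [foldB_eq, foldB_eq]
  -- both sides are lengths of Nodup lists with the same members
  have hS0 : (PySem.Set.ofList [(((0:Int)), ((0:Int)))] : PySem.Set (Int × Int)).Nodup :=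
    PySem.Set.nodup_ofList _
  have hA : (PySem.Set.update (PySem.Set.ofList [(((0:Int)), ((0:Int)))])
      (pvIVis (0, 0) (0, 0) (PySem.Chars.strip s.toList))).Nodup :=
    PySem.Set.nodup_update _ _ hS0
  have hB : (PySem.Set.union
      (PySem.Set.update (PySem.Set.ofList [(((0:Int)), ((0:Int)))])
        (pvVis (0, 0) (pvEvens (PySem.Chars.strip s.toList))))
      (PySem.Set.update (PySem.Set.ofList [(((0:Int)), ((0:Int)))])
        (pvVis (0, 0) (pvEvens (PySem.Chars.strip s.toList).tail)))).Nodup :=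
    PySem.Set.nodup_union _ _ (PySem.Set.nodup_update _ _ hS0)
  have hmem : ∀ q, q ∈ PySem.Set.update (PySem.Set.ofList [(((0:Int)), ((0:Int)))])
      (pvIVis (0, 0) (0, 0) (PySem.Chars.strip s.toList)) ↔
      q ∈ PySem.Set.union
        (PySem.Set.update (PySem.Set.ofList [(((0:Int)), ((0:Int)))])
          (pvVis (0, 0) (pvEvens (PySem.Chars.strip s.toList))))
        (PySem.Set.update (PySem.Set.ofList [(((0:Int)), ((0:Int)))])
          (pvVis (0, 0) (pvEvens (PySem.Chars.strip s.toList).tail))) := by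
    intro q
    rw [PySem.Set.mem_union, PySem.Set.mem_update, PySem.Set.mem_update,
      PySem.Set.mem_update, mem_ivis]
    tauto
  have hperm := (List.perm_ext_iff_of_nodup hA hB).mpr hmem
  simp only [PySem.Set.len]
  rw [hperm.length_eq]

-- ===== VERDICT (by name: the statement is the Claim_ definition above) =====
theorem day3_part2_spec : Claim_equal_day3_part2 := by
  intro s _ _
  unfold Spec_day3_part2
  exact day3_part2_spec_aux s
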